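-- pv_equiv track=rewrite | github.com/daniel-reich/ubiquitous-fiesta | n3zH5NvzPXb2qd5N5_22.py | how_mega_is_it
-- ===== SOURCE A (Python) =====
-- def how_mega_is_it(n):
--
--   Number = abs(n)
--
--   if (Number < 100):
--     return "not a mega milestone"
--
--   Failsafe = 0
--   Value = 10
--   Power = 0
--
--   while (Failsafe == 0):
--
--     Score = Value ** Power
--
--     if (Score > Number):
--       Failsafe += 1
--     else:
--       Power += 1
--
--   Power -= 2
--
--   Prefix = "MEGA " * Power
--   Suffix = "milestone"
--
--   Answer = Prefix + Suffix
--
--   return Answer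
-- ===== SOURCE B (Python) =====
-- def how_mega_is_it(n):
--   a = abs(n)
--   if a < 100:
--     return "not a mega milestone"
--   return "MEGA " * (len(str(a)) - 2) + "milestone"
-- ===== Notes on version B (the rewrite author's own statement) =====
-- stated objective: simpler
-- what changed: Replaces A's unbounded while-loop that re-exponentiates Value ** Power from scratch each iteration while searching for the first power of ten exceeding |n| with a direct decimal digit count via len(str(abs(n))) and a closed-form string repeat.
import Mathlib
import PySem

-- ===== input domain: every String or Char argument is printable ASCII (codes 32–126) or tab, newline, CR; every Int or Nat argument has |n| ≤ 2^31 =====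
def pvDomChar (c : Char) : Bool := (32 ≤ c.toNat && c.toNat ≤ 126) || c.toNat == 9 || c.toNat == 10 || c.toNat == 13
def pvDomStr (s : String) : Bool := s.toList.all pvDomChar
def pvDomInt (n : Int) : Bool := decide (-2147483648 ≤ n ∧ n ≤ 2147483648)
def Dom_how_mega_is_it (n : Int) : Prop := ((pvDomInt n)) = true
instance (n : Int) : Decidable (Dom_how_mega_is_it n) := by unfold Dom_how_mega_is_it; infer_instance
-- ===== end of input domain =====

-- B replaces A's power-of-ten search loop by a direct decimal digit count (len(str(abs(n)))); objective: simpler.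

-- ===== PORT A =====
-- Python's  "MEGA " * k  (k an int; nonpositive k gives ""): shared by both ports, as both Pythons use it.
def megaPrefixChars (k : Int) : List Char := List.flatten (List.replicate k.toNat "MEGA ".toList)

-- A's while-loop: Failsafe flips to 1 (ending the loop) exactly when 10 ** Power > Number,
-- otherwise Power is incremented; returns the final Power.  Power is a Nat (it starts at 0
-- and only ever grows); the loop body computes Score = Value ** Power with Value = 10.
def howLoop (number : Int) (power : Nat) : Nat :=
  if (10 : Int) ^ power > number then power else howLoop number (power + 1)
termination_by number.toNat + 1 - power
decreasing_by
  have h10 : (power : Int) < (10 : Int) ^ power := by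
    exact_mod_cast Nat.lt_pow_self (a := 10) (n := power) (by norm_num)
  omega

def how_mega_is_it (n : Int) : String :=
  let number := |n|
  if number < 100 then "not a mega milestone"
  else
    let power : Int := (howLoop number 0 : Int) - 2
    String.ofList (megaPrefixChars power ++ "milestone".toList)

-- ===== PORT B =====
def how_mega_is_it_alt (n : Int) : String :=
  let a := |n|
  if a < 100 then "not a mega milestone"
  else
    let digits : Int := PySem.Str.len (PySem.Int.toStr a)
    String.ofList (megaPrefixChars (digits - 2) ++ "milestone".toList)

-- ===== PRECONDITION & SPEC =====
def Spec_how_mega_is_it (n : Int) (out : String) : Prop := out = how_mega_is_it_alt n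
instance (n : Int) (out : String) : Decidable (Spec_how_mega_is_it n out) := by unfold Spec_how_mega_is_it; infer_instance

-- ===== CLAIM (what is proved, stated in full; the proofs are below) =====
def Claim_equal_how_mega_is_it : Prop := ∀ (n : Int), Dom_how_mega_is_it n → Spec_how_mega_is_it n (how_mega_is_it n)

-- ===== LEMMAS AND PROOFS =====

-- decimal digit count of a Nat
def dcNat (n : Nat) : Nat :=
  if n < 10 then 1 else dcNat (n / 10) + 1
decreasing_by exact Nat.div_lt_self (by omega) (by norm_num)

lemma tdc_len (f : Nat) : ∀ (n : Nat) (l : List Char), n < f →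
    (Nat.toDigitsCore 10 f n l).length = dcNat n + l.length := by
  induction f with
  | zero => intro n l h; omega
  | succ f ih =>
    intro n l h
    rw [Nat.toDigitsCore]
    by_cases h10 : n / 10 = 0
    · simp only [h10, if_true, List.length_cons]
      have hlt : n < 10 := by omega
      rw [dcNat]
      simp [hlt]
      omega
    · simp only [h10, if_false]
      rw [ih (n / 10) _ (by omega)]
      have hn : dcNat n = dcNat (n / 10) + 1 := by
        rw [dcNat]; simp [show ¬ n < 10 by omega]
      simp [hn, List.length_cons]
      omega

lemma toDigits_len (n : Nat) : (Nat.toDigits 10 n).length = dcNat n := by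
  rw [Nat.toDigits, tdc_len (n + 1) n [] (by omega)]
  simp

lemma dc_upper (n : Nat) : n < 10 ^ dcNat n := by
  induction n using Nat.strong_induction_on with
  | _ n ih =>
    rw [dcNat]
    by_cases h : n < 10
    · simp [h]
    · simp only [h, if_false]
      have := ih (n / 10) (Nat.div_lt_self (by omega) (by norm_num))
      calc n < (n / 10 + 1) * 10 := by omega
        _ ≤ 10 ^ dcNat (n / 10) * 10 := by
              have : n / 10 + 1 ≤ 10 ^ dcNat (n / 10) := this
              exact Nat.mul_le_mul_right 10 this
        _ = 10 ^ (dcNat (n / 10) + 1) := by ring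

lemma dc_lower (n : Nat) (h1 : 1 ≤ n) : 10 ^ (dcNat n - 1) ≤ n := by
  induction n using Nat.strong_induction_on with
  | _ n ih =>
    rw [dcNat]
    by_cases h : n < 10
    · simp only [h, if_true]
      simpa using h1
    · simp only [h, if_false]
      have hd := ih (n / 10) (Nat.div_lt_self (by omega) (by norm_num)) (by omega)
      have : 10 ^ (dcNat (n / 10) + 1 - 1) = 10 ^ (dcNat (n / 10) - 1) * 10 := by
        have h1d : 1 ≤ dcNat (n / 10) := by rw [dcNat]; split <;> omega
        rw [← pow_succ]
        congr 1
        omega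
      rw [this]
      calc 10 ^ (dcNat (n / 10) - 1) * 10 ≤ (n / 10) * 10 := Nat.mul_le_mul_right 10 hd
        _ ≤ n := by omega

lemma howLoop_reach (m : Int) : ∀ (d p : Nat), m < 10 ^ (p + d) →
    (∀ q, q < p + d → (10 : Int) ^ q ≤ m) → howLoop m p = p + d := by
  intro d
  induction d with
  | zero =>
    intro p h _
    rw [howLoop]
    simp only [Nat.add_zero] at h ⊢
    simp [h]
  | succ d ih =>
    intro p h hall
    rw [howLoop]
    have hle : (10 : Int) ^ p ≤ m := hall p (by omega)
    have : ¬ (10 : Int) ^ p > m := by omega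
    simp only [this, if_false]
    have := ih (p + 1) (by rw [show p + 1 + d = p + (d + 1) by omega]; exact h)
      (by intro q hq; exact hall q (by omega))
    omega

lemma howLoop_eq_dc (m : Int) (hm : 100 ≤ m) : howLoop m 0 = dcNat m.toNat := by
  have h0 : (0 : Int) ≤ m := by omega
  have hup : m < 10 ^ dcNat m.toNat := by
    have := dc_upper m.toNat
    have : (m.toNat : Int) < ((10 : Nat) ^ dcNat m.toNat : Nat) := by exact_mod_cast this
    simpa [Int.toNat_of_nonneg h0] using this
  have hall : ∀ q, q < dcNat m.toNat → (10 : Int) ^ q ≤ m := by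
    intro q hq
    have hl := dc_lower m.toNat (by omega)
    have hq' : 10 ^ q ≤ 10 ^ (dcNat m.toNat - 1) :=
      Nat.pow_le_pow_right (by norm_num) (by omega)
    have : ((10 : Nat) ^ q : Nat) ≤ (m.toNat : Int) := by exact_mod_cast le_trans hq' hl
    calc (10 : Int) ^ q = ((10 : Nat) ^ q : Nat) := by push_cast; ring
      _ ≤ (m.toNat : Int) := this
      _ = m := Int.toNat_of_nonneg h0
  simpa using howLoop_reach m (dcNat m.toNat) 0 (by simpa using hup) (by simpa using hall)

lemma toChars_len_eq_dc (m : Int) (hm : 0 ≤ m) :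
    (PySem.Int.toChars m).length = dcNat m.toNat := by
  rw [PySem.Int.toChars]
  have : ¬ m < 0 := by omega
  simp only [this, if_false]
  exact toDigits_len m.toNat

-- ===== VERDICT (by name: the statement is the Claim_ definition above) =====
theorem how_mega_is_it_spec : Claim_equal_how_mega_is_it := by
  intro n _
  unfold Spec_how_mega_is_it how_mega_is_it how_mega_is_it_alt
  by_cases h : |n| < 100
  · simp [h]
  · simp only [h, if_false]
    have hm : 100 ≤ |n| := by omega
    congr 2
    rw [howLoop_eq_dc _ hm]
    rw [PySem.Str.len, PySem.Int.toList_toStr, toChars_len_eq_dc _ (by omega)]
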